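-- pv_equiv track=rewrite | github.com/earlwerner1210-bit/control-fabric-platform | app/domain_packs/telco_ops/parsers.py | detect_state_transitions
-- ===== SOURCE A (Python) =====
-- def detect_state_transitions(history: list[dict]) -> list[dict]:
--     """Identify state transitions from a chronological history list.
--
--     Each item in *history* should have ``state`` and ``timestamp`` keys.
--     """
--     transitions: list[dict] = []
--     prev_state: str | None = None
--     for entry in sorted(history, key=lambda e: e.get("timestamp", "")):
--         current_state = entry.get("state", "")
--         if prev_state is not None and current_state != prev_state:
--             transitions.append({
--                 "from_state": prev_state,
--                 "to_state": current_state,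
--                 "timestamp": entry.get("timestamp", ""),
--                 "reason": entry.get("reason", ""),
--             })
--         prev_state = current_state
--     return transitions
-- ===== SOURCE B (Python) =====
-- def detect_state_transitions(history: list[dict]) -> list[dict]:
--     """Identify state transitions: group the sorted history into maximal runs
--     of equal state, then pair consecutive runs."""
--     ordered = sorted(history, key=lambda e: e.get("timestamp", ""))
--     runs = []  # (state, first entry of the run) for each maximal run
--     i = 0
--     n = len(ordered)
--     while i < n:
--         st = ordered[i].get("state", "")
--         runs.append((st, ordered[i]))
--         i += 1
--         while i < n and ordered[i].get("state", "") == st: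
--             i += 1
--     return [
--         {
--             "from_state": p,
--             "to_state": c,
--             "timestamp": e.get("timestamp", ""),
--             "reason": e.get("reason", ""),
--         }
--         for (p, _), (c, e) in zip(runs, runs[1:])
--     ]
-- ===== Notes on version B (the rewrite author's own statement) =====
-- stated objective: alternative
-- what changed: B first condenses the sorted history into a list of maximal runs of equal state (keeping each run's first entry) and then emits one transition per adjacent pair of runs, instead of A's single scan carrying a prev_state variable.
import Mathlib
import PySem

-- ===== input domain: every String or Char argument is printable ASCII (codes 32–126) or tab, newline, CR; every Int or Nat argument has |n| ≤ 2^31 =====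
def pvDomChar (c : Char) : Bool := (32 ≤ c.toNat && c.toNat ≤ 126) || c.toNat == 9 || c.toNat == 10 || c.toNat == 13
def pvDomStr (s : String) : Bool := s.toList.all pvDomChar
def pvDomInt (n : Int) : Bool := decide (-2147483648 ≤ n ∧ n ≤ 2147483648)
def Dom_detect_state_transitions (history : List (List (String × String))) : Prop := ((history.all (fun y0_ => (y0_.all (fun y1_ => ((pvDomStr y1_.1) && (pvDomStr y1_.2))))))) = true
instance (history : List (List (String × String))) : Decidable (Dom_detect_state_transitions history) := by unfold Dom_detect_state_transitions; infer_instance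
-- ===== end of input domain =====

-- B replaces A's single scan with a prev_state variable by condensing the sorted
-- history into maximal runs of equal state and pairing adjacent runs (alternative
-- decomposition, same cost).

-- shared helper: entry.get(key, "") on an association-list dict (first match)
def pvGet (e : List (String × String)) (k : String) : String :=
  (((e.find? (fun p => p.1 == k)).map Prod.snd)).getD ""

-- ===== PORT A =====
-- the loop of A: accumulator of transitions, prev_state : Option String
def aLoop (acc : List (List (String × String))) (prev : Option String) :
    List (List (String × String)) → List (List (String × String))
  | [] => acc
  | e :: rest =>
    let cur := pvGet e "state"
    let acc' :=
      match prev with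
      | some p =>
          if cur ≠ p then
            acc ++ [[("from_state", p), ("to_state", cur),
                     ("timestamp", pvGet e "timestamp"), ("reason", pvGet e "reason")]]
          else acc
      | none => acc
    aLoop acc' (some cur) rest

def detect_state_transitions (history : List (List (String × String))) :
    List (List (String × String)) :=
  aLoop [] none (PySem.List.sorted history (fun e => pvGet e "timestamp") false)

-- ===== PORT B =====
-- inner while: skip the rest of the current run of state st
def bSkip (st : String) : List (List (String × String)) → List (List (String × String))
  | [] => []
  | e :: rest => if pvGet e "state" == st then bSkip st rest else e :: rest

theorem bSkip_length_le (st : String) (l : List (List (String × String))) :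
    (bSkip st l).length ≤ l.length := by
  induction l with
  | nil => simp [bSkip]
  | cons e rest ih =>
    simp only [bSkip]
    split
    · exact le_trans ih (Nat.le_succ _)
    · exact le_refl _

-- outer while: (state, first entry) of each maximal run
def bRuns : List (List (String × String)) → List (String × List (String × String))
  | [] => []
  | e :: rest =>
    let st := pvGet e "state"
    (st, e) :: bRuns (bSkip st rest)
termination_by l => l.length
decreasing_by
  exact Nat.lt_succ_of_le (bSkip_length_le _ _)

def detect_state_transitions_alt (history : List (List (String × String))) :
    List (List (String × String)) :=
  let runs := bRuns (PySem.List.sorted history (fun e => pvGet e "timestamp") false)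
  (runs.zip runs.tail).map (fun pc =>
    [("from_state", pc.1.1), ("to_state", pc.2.1),
     ("timestamp", pvGet pc.2.2 "timestamp"), ("reason", pvGet pc.2.2 "reason")])

-- ===== PRECONDITION & SPEC =====
def Spec_detect_state_transitions (history : List (List (String × String))) (out : List (List (String × String))) : Prop := out = detect_state_transitions_alt history
instance (history : List (List (String × String))) (out : List (List (String × String))) : Decidable (Spec_detect_state_transitions history out) := by unfold Spec_detect_state_transitions; infer_instance

-- ===== CLAIM (what is proved, stated in full; the proofs are below) =====
def Claim_equal_detect_state_transitions : Prop := ∀ (history : List (List (String × String))), Dom_detect_state_transitions history → Spec_detect_state_transitions history (detect_state_transitions history)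

-- ===== LEMMAS AND PROOFS =====

-- the transition dict A emits at entry e coming from state p
def pvTr (p : String) (e : List (String × String)) : List (String × String) :=
  [("from_state", p), ("to_state", pvGet e "state"),
   ("timestamp", pvGet e "timestamp"), ("reason", pvGet e "reason")]

-- proof-side shape of B's adjacent-pair map, threaded by the previous run's state
def pairsFrom (p : String) : List (String × List (String × String)) → List (List (String × String))
  | [] => []
  | (_, e) :: gs => pvTr p e :: pairsFrom (pvGet e "state") gs

theorem aLoop_acc (l : List (List (String × String))) :
    ∀ acc prev, aLoop acc prev l = acc ++ aLoop [] prev l := by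
  induction l with
  | nil => intro acc prev; simp [aLoop]
  | cons e rest ih =>
    intro acc prev
    cases prev with
    | none => simp only [aLoop]; rw [ih]
    | some p =>
      simp only [aLoop]
      by_cases h : pvGet e "state" ≠ p
      · simp only [if_pos h]
        rw [ih, ih]
        simp
        conv_rhs => rw [ih]
        simp
      · simp only [if_neg h]
        rw [ih]

-- each run in bRuns is keyed by the state of its first entry
theorem bRuns_key : ∀ l, ∀ g ∈ bRuns l, g.1 = pvGet g.2 "state" := by
  intro l
  induction l using bRuns.induct with
  | case1 => intro g hg; simp [bRuns] at hg
  | case2 e rest st ih =>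
    intro g hg
    simp only [bRuns, List.mem_cons] at hg
    rcases hg with h | h
    · subst h; rfl
    · exact ih g h

-- main invariant: A's scan from prev = some p equals B's run pairing after
-- skipping the (possibly empty) leading run of state p
theorem main_inv (l : List (List (String × String))) :
    ∀ p, aLoop [] (some p) l = pairsFrom p (bRuns (bSkip p l)) := by
  induction l with
  | nil => intro p; simp [aLoop, bSkip, bRuns, pairsFrom]
  | cons e rest ih =>
    intro p
    by_cases h : pvGet e "state" = p
    · simp only [aLoop, bSkip, h, if_neg (by simp : ¬ (p ≠ p)), beq_self_eq_true, if_pos]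
      exact ih p
    · have hb : (pvGet e "state" == p) = false := by simp [h]
      simp only [aLoop, bSkip, hb, if_pos h, Bool.false_eq_true, if_false]
      rw [aLoop_acc, bRuns]
      simp only [pairsFrom, pvTr]
      rw [ih (pvGet e "state")]
      simp

-- B's zip-with-tail map over runs equals pairsFrom of the tail
theorem zip_pairs (gs : List (String × List (String × String)))
    (hk : ∀ g ∈ gs, g.1 = pvGet g.2 "state") :
    ∀ g0 : String × List (String × String),
    (((g0 :: gs).zip gs).map (fun pc =>
      [("from_state", pc.1.1), ("to_state", pc.2.1),
       ("timestamp", pvGet pc.2.2 "timestamp"), ("reason", pvGet pc.2.2 "reason")]))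
      = pairsFrom g0.1 gs := by
  induction gs with
  | nil => intro g0; simp [pairsFrom]
  | cons g gs' ih =>
    intro g0
    have hg : g.1 = pvGet g.2 "state" := hk g (List.mem_cons_self)
    have ih' := ih (fun x hx => hk x (List.mem_cons_of_mem _ hx)) g
    rw [hg] at ih'
    simp only [List.zip, List.zipWith, List.map, pairsFrom, pvTr, List.cons.injEq] at ih' ⊢
    exact ⟨by simp [← hg], ih'⟩

-- ===== VERDICT (by name: the statement is the Claim_ definition above) =====
theorem detect_state_transitions_spec : Claim_equal_detect_state_transitions := by
  intro history _
  unfold Spec_detect_state_transitions detect_state_transitions detect_state_transitions_alt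
  generalize (PySem.List.sorted history (fun e => pvGet e "timestamp") false) = l
  cases l with
  | nil => simp [aLoop, bRuns]
  | cons e rest =>
    simp only [aLoop]
    rw [main_inv, bRuns]
    simp only [List.tail_cons]
    rw [zip_pairs (bRuns (bSkip (pvGet e "state") rest)) (bRuns_key _) (pvGet e "state", e)]
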